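-- pv_equiv track=rewrite | github.com/Sheerabth/lab_main | sem_5/md/ps2/ps2_3.py | shuffle_sort
-- ===== SOURCE A (Python) =====
-- def shuffle_sort(map_result):
--     shuffle_sort_result = {}
--     for word_tuple in sorted(map_result):
--         if word_tuple[0] in shuffle_sort_result:
--             shuffle_sort_result[word_tuple[0]].append(word_tuple[1])
--         else:
--             shuffle_sort_result[word_tuple[0]] = [word_tuple[1]]
--     return shuffle_sort_result
-- ===== SOURCE B (Python) =====
-- def shuffle_sort(map_result):
--     keys = sorted({k for k, _ in map_result})
--     return {k: sorted(v for kk, v in map_result if kk == k) for k in keys}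
-- ===== Notes on version B (the rewrite author's own statement) =====
-- stated objective: alternative
-- what changed: B never sorts the tuple list and has no membership-tested incremental dict: it collects the distinct keys in a set, sorts the keys, and for each key filters out and independently sorts that key's values, whereas A lexicographically sorts all tuples and appends/creates dict entries per tuple.
import Mathlib
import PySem

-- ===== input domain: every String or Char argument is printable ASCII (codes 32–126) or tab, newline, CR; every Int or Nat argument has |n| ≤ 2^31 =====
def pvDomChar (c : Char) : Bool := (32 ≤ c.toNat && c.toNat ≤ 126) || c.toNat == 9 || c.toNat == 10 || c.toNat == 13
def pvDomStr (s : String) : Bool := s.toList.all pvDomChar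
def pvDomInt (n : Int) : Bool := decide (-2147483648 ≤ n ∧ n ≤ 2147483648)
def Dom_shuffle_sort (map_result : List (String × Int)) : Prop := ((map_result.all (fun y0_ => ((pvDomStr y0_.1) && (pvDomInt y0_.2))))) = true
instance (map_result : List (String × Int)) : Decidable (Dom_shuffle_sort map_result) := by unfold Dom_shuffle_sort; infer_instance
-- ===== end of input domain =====

-- B drops A's full lexicographic tuple sort and membership-tested dict: it sorts the
-- distinct keys from a set and, per key, filters out and sorts that key's values
-- independently (alternative decomposition; return value only).

-- ===== PORT A =====
-- the loop body: if key in dict then append to its list else create a singleton entry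
def srStep (d : PySem.Dict String (List Int)) (p : String × Int) : PySem.Dict String (List Int) :=
  if d.contains p.1 then d.insert p.1 (d.getD p.1 [] ++ [p.2]) else d.insert p.1 [p.2]

def shuffle_sort (map_result : List (String × Int)) : List (String × List Int) :=
  ((PySem.List.sorted2 map_result (fun t => t.1) (fun t => t.2)).foldl srStep PySem.Dict.empty).items

-- ===== PORT B =====
-- keys = sorted({k for k, _ in map_result})
-- {k: sorted(v for kk, v in map_result if kk == k) for k in keys}
def shuffle_sort_alt (map_result : List (String × Int)) : List (String × List Int) :=
  (PySem.List.sorted (PySem.Set.ofList (map_result.map (fun p => p.1))) (fun k => k) false).map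
    (fun k => (k, PySem.List.sorted ((map_result.filter (fun p => p.1 == k)).map (fun p => p.2)) (fun v => v) false))

-- ===== PRECONDITION & SPEC =====
def Spec_shuffle_sort (map_result : List (String × Int)) (out : List (String × List Int)) : Prop := out = shuffle_sort_alt map_result
instance (map_result : List (String × Int)) (out : List (String × List Int)) : Decidable (Spec_shuffle_sort map_result out) := by unfold Spec_shuffle_sort; infer_instance

-- ===== CLAIM (what is proved, stated in full; the proofs are below) =====
def Claim_equal_shuffle_sort : Prop := ∀ (map_result : List (String × Int)), Dom_shuffle_sort map_result → Spec_shuffle_sort map_result (shuffle_sort map_result)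

-- ===== LEMMAS AND PROOFS =====

-- proof-only helper: run grouping of a key-sorted list (used to characterise A's fold)
def srGroup : List (String × Int) → List (String × List Int)
  | [] => []
  | p :: rest =>
    (p.1, p.2 :: (rest.takeWhile (fun q => q.1 == p.1)).map (fun q => q.2)) ::
      srGroup (rest.dropWhile (fun q => q.1 == p.1))
termination_by l => l.length
decreasing_by
  simpa using Nat.lt_succ_of_le (List.length_dropWhile_le _ _)

-- the lexicographic order sorted2 establishes on its output
def lexLe (a b : String × Int) : Prop := a.1 < b.1 ∨ (a.1 = b.1 ∧ a.2 ≤ b.2)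

lemma lexLe_trans {a b c : String × Int} (h1 : lexLe a b) (h2 : lexLe b c) : lexLe a c := by
  rcases h1 with h1 | ⟨h1, h1'⟩ <;> rcases h2 with h2 | ⟨h2, h2'⟩
  · exact Or.inl (lt_trans h1 h2)
  · exact Or.inl (h2 ▸ h1)
  · exact Or.inl (h1 ▸ h2)
  · exact Or.inr ⟨h1.trans h2, le_trans h1' h2'⟩

-- inserting with sorted2's comparator preserves lexicographic Pairwise
lemma insertBy_pairwise_lex (x : String × Int) : ∀ (ys : List (String × Int)),
    ys.Pairwise lexLe →
    (PySem.List.insertBy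
      (fun a b => decide (a.1 < b.1) || (!decide (b.1 < a.1) && decide (a.2 < b.2))) x ys).Pairwise
      lexLe := by
  intro ys
  induction ys with
  | nil => intro _; simp [PySem.List.insertBy]
  | cons y t ih =>
    intro h
    rw [List.pairwise_cons] at h
    by_cases hb : (decide (x.1 < y.1) || (!decide (y.1 < x.1) && decide (x.2 < y.2))) = true
    · have hxy : lexLe x y := by
        rcases Bool.or_eq_true_iff.mp hb with h1 | h1
        · exact Or.inl (of_decide_eq_true h1)
        · have h2 := (Bool.and_eq_true_iff.mp h1).1
          have h3 := (Bool.and_eq_true_iff.mp h1).2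
        -- ¬ y.1 < x.1
          rcases lt_trichotomy x.1 y.1 with hlt | heq | hgt
          · exact Or.inl hlt
          · exact Or.inr ⟨heq, le_of_lt (of_decide_eq_true h3)⟩
          · exact absurd hgt (by simpa using h2)
      simp only [PySem.List.insertBy, hb, if_true]
      refine List.pairwise_cons.mpr ⟨?_, List.pairwise_cons.mpr h⟩
      intro z hz
      rcases List.mem_cons.mp hz with rfl | hz
      · exact hxy
      · exact lexLe_trans hxy (h.1 z hz)
    · have hyx : lexLe y x := by
        rcases lt_trichotomy x.1 y.1 with hlt | heq | hgt
        · exact absurd (by simp [hlt] : _ = true) hb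
        · rcases le_or_gt x.2 y.2 with h2 | h2
          · rcases lt_or_eq_of_le h2 with h2 | h2
            · exact absurd (by simp [heq, h2] : _ = true) hb
            · exact Or.inr ⟨heq.symm, le_of_eq h2.symm⟩
          · exact Or.inr ⟨heq.symm, le_of_lt h2⟩
        · exact Or.inl hgt
      simp only [PySem.List.insertBy, hb]
      refine List.pairwise_cons.mpr ⟨?_, ih h.2⟩
      intro z hz
      have := (PySem.List.insertBy_perm _ x t).mem_iff.mp hz
      rcases (by simpa using this : z = x ∨ z ∈ t) with rfl | hzt
      · exact hyx
      · exact h.1 z hzt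

lemma foldl_insertBy_pairwise_lex : ∀ (xs acc : List (String × Int)),
    acc.Pairwise lexLe →
    (xs.foldl (fun acc x => PySem.List.insertBy
      (fun a b => decide (a.1 < b.1) || (!decide (b.1 < a.1) && decide (a.2 < b.2))) x acc) acc).Pairwise
      lexLe := by
  intro xs
  induction xs with
  | nil => intro acc h; simpa using h
  | cons x t ih =>
    intro acc h
    exact ih _ (insertBy_pairwise_lex x acc h)

lemma sorted2_pairwise_lex (l : List (String × Int)) :
    (PySem.List.sorted2 l (fun t => t.1) (fun t => t.2)).Pairwise lexLe := by
  simp only [PySem.List.sorted2, if_neg (by decide : ¬ (false = true))]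
  exact foldl_insertBy_pairwise_lex l [] (by simp)

lemma sorted2_pairwise_fst (l : List (String × Int)) :
    (PySem.List.sorted2 l (fun t => t.1) (fun t => t.2)).Pairwise (fun a b => a.1 ≤ b.1) := by
  refine (sorted2_pairwise_lex l).imp ?_
  intro a b h
  rcases h with h | ⟨h, _⟩
  · exact le_of_lt h
  · exact le_of_eq h

-- folding A's step over a run of equal keys appends the run's values to that key's entry
lemma run_foldl (k : String) : ∀ (same : List (String × Int)),
    (∀ p ∈ same, p.1 = k) →
    ∀ (d : PySem.Dict String (List Int)), d.keys.Nodup → d.contains k = true →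
    (same.foldl srStep d).items =
      d.items.map (fun q => if q.1 = k then (k, d.getD k [] ++ same.map (fun q => q.2)) else q) := by
  intro same
  induction same with
  | nil =>
    intro _ d hnd _
    simp only [List.foldl_nil, List.map_nil, List.append_nil]
    symm
    refine (List.map_congr_left ?_).trans (List.map_id _)
    intro q hq
    obtain ⟨q1, q2⟩ := q
    by_cases h : q1 = k
    · subst h
      have := PySem.Dict.getD_of_mem_items d hq hnd []
      simp [this]
    · simp [h]
  | cons p t ih =>
    intro hall d hnd hc
    have hpk : p.1 = k := hall p (by simp)
    have hstep : srStep d p = d.insert k (d.getD k [] ++ [p.2]) := by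
      simp [srStep, hpk, hc]
    set d' := d.insert k (d.getD k [] ++ [p.2]) with hd'
    have hitems' : d'.items = d.items.map (fun q => if q.1 = k then (k, d.getD k [] ++ [p.2]) else q) := by
      rw [hd', PySem.Dict.items_insert_of_contains d _ hc]
      exact List.map_congr_left (fun q _ => by by_cases h : q.1 = k <;> simp [h])
    have hkeys' : d'.keys = d.keys := by
      simp only [PySem.Dict.keys, hitems', List.map_map]
      exact List.map_congr_left (fun q _ => by by_cases h : q.1 = k <;> simp [h])
    have hc' : d'.contains k = true := by
      rw [PySem.Dict.contains_eq_decide_mem_keys, hkeys']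
      rw [PySem.Dict.contains_eq_decide_mem_keys] at hc
      exact hc
    have hgd' : d'.getD k [] = d.getD k [] ++ [p.2] := PySem.Dict.getD_insert_self d k _ []
    have := ih (fun q hq => hall q (by simp [hq])) d' (hkeys' ▸ hnd) hc'
    rw [List.foldl_cons, hstep, this, hitems', List.map_map]
    refine List.map_congr_left (fun q _ => ?_)
    by_cases h : q.1 = k <;> simp [h, hgd', List.append_assoc]

-- after the run of key k, every remaining key is strictly larger
lemma dropWhile_gt (k : String) : ∀ (rest : List (String × Int)),
    rest.Pairwise (fun a b => a.1 ≤ b.1) → (∀ p ∈ rest, k ≤ p.1) →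
    ∀ p ∈ rest.dropWhile (fun q => q.1 == k), k < p.1 := by
  intro rest
  induction rest with
  | nil => intro _ _ p hp; simp at hp
  | cons r t ih =>
    intro hpw hle p hp
    rw [List.pairwise_cons] at hpw
    rw [List.dropWhile_cons] at hp
    by_cases hr : (r.1 == k) = true
    · rw [if_pos hr] at hp
      exact ih hpw.2 (fun q hq => hle q (by simp [hq])) p hp
    · rw [if_neg hr] at hp
      have hrk : k < r.1 :=
        lt_of_le_of_ne (hle r (by simp)) (fun h => hr (by simp [h.symm]))
      rcases List.mem_cons.mp hp with rfl | hp
      · exact hrk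
      · exact lt_of_lt_of_le hrk (hpw.1 p hp)

-- main invariant: over a key-sorted list whose keys are all fresh for d,
-- A's dict fold appends exactly the run grouping to d's items
lemma main_foldl : ∀ (n : Nat) (l : List (String × Int)) (d : PySem.Dict String (List Int)),
    l.length ≤ n → l.Pairwise (fun a b => a.1 ≤ b.1) → d.keys.Nodup →
    (∀ p ∈ l, d.contains p.1 = false) →
    (l.foldl srStep d).items = d.items ++ srGroup l := by
  intro n
  induction n with
  | zero =>
    intro l d hlen _ _ _
    have : l = [] := List.eq_nil_of_length_eq_zero (Nat.le_zero.mp hlen)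
    subst this; simp [srGroup]
  | succ n ih =>
    intro l d hlen hpw hnd hfresh
    match l with
    | [] => simp [srGroup]
    | (k, v) :: rest =>
      rw [List.pairwise_cons] at hpw
      have hck : d.contains k = false := hfresh (k, v) (by simp)
      have hknotin : k ∉ d.keys := by
        rw [PySem.Dict.contains_eq_decide_mem_keys] at hck
        simpa using hck
      have hstep1 : srStep d (k, v) = d.insert k [v] := by simp [srStep, hck]
      set d1 := d.insert k [v] with hd1
      have hitems1 : d1.items = d.items ++ [(k, [v])] :=
        PySem.Dict.items_insert_of_not_contains d [v] hck
      have hkeys1 : d1.keys = d.keys ++ [k] := by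
        simp [PySem.Dict.keys, hitems1]
      have hnd1 : d1.keys.Nodup := by
        rw [hkeys1, List.nodup_append]
        refine ⟨hnd, List.nodup_singleton k, ?_⟩
        intro a ha b hb
        simp only [List.mem_singleton] at hb
        subst hb
        exact fun h => hknotin (h ▸ ha)
      have hc1 : d1.contains k = true := by
        rw [PySem.Dict.contains_eq_decide_mem_keys, hkeys1]; simp
      set same := rest.takeWhile (fun q => q.1 == k) with hsame
      set restr := rest.dropWhile (fun q => q.1 == k) with hrestr
      have hsplit : rest = same ++ restr := (List.takeWhile_append_dropWhile).symm
      have hsame_k : ∀ p ∈ same, p.1 = k := by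
        intro p hp
        have := List.mem_takeWhile_imp hp
        simpa using this
      have hrun := run_foldl k same hsame_k d1 hnd1 hc1
      have hgd1 : d1.getD k [] = [v] := PySem.Dict.getD_insert_self d k [v] []
      set d2 := same.foldl srStep d1 with hd2
      have hqne : ∀ q ∈ d.items, q.1 ≠ k := by
        intro q hq h
        exact hknotin (h ▸ (by exact List.mem_map_of_mem hq : q.1 ∈ d.items.map (fun x => x.1)))
      have hitems2 : d2.items = d.items ++ [(k, v :: same.map (fun q => q.2))] := by
        rw [hd2, hrun, hitems1, List.map_append]
        congr 1
        · exact (List.map_congr_left (fun q hq => by simp [hqne q hq])).trans (List.map_id _)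
        · simp [hgd1]
      have hkeys2 : d2.keys = d.keys ++ [k] := by
        simp [PySem.Dict.keys, hitems2]
      have hnd2 : d2.keys.Nodup := hkeys2 ▸ (hkeys1 ▸ hnd1)
      have hrestr_gt : ∀ p ∈ restr, k < p.1 :=
        dropWhile_gt k rest hpw.2 (fun p hp => hpw.1 p hp)
      have hfresh2 : ∀ p ∈ restr, d2.contains p.1 = false := by
        intro p hp
        rw [PySem.Dict.contains_eq_decide_mem_keys, hkeys2]
        have h1 : p.1 ∉ d.keys := by
          have := hfresh p (by simp [hsplit, List.mem_append, hp])
          rw [PySem.Dict.contains_eq_decide_mem_keys] at this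
          simpa using this
        have h2 : p.1 ≠ k := ne_of_gt (hrestr_gt p hp)
        simp [h1, h2]
      have hpw2 : restr.Pairwise (fun a b => a.1 ≤ b.1) :=
        hpw.2.sublist (hrestr ▸ List.dropWhile_sublist _)
      have hlen2 : restr.length ≤ n := by
        have h1 : restr.length ≤ rest.length := hrestr ▸ List.length_dropWhile_le _ _
        have h2 : rest.length ≤ n := by simpa using Nat.lt_succ_iff.mp (Nat.lt_of_lt_of_le (by simp) hlen)
        omega
      have hIH := ih restr d2 hlen2 hpw2 hnd2 hfresh2
      calc (((k, v) :: rest).foldl srStep d).items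
          = (restr.foldl srStep d2).items := by
            rw [List.foldl_cons, hstep1, hsplit, List.foldl_append, ← hd2]
        _ = d.items ++ [(k, v :: same.map (fun q => q.2))] ++ srGroup restr := by
            rw [hIH, hitems2]
        _ = d.items ++ srGroup ((k, v) :: rest) := by
            rw [srGroup, ← hsame, ← hrestr]
            simp

-- B's shape computed on a lexicographically sorted list s equals the run grouping of s
lemma srGroup_eq : ∀ (n : Nat) (s : List (String × Int)), s.length ≤ n → s.Pairwise lexLe →
    srGroup s = (PySem.List.sorted (PySem.Set.ofList (s.map (fun p => p.1))) (fun k => k) false).map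
      (fun k => (k, PySem.List.sorted ((s.filter (fun p => p.1 == k)).map (fun p => p.2)) (fun v => v) false)) := by
  intro n
  induction n with
  | zero =>
    intro s hlen _
    have : s = [] := List.eq_nil_of_length_eq_zero (Nat.le_zero.mp hlen)
    subst this
    simp [srGroup, PySem.List.sorted_eq_nil_iff]
  | succ n ih =>
    intro s hlen hpwS
    match s with
    | [] => simp [srGroup, PySem.List.sorted_eq_nil_iff]
    | (k, v) :: rest =>
      have hpw := List.pairwise_cons.mp hpwS
      set same := rest.takeWhile (fun q => q.1 == k) with hsame
      set restr := rest.dropWhile (fun q => q.1 == k) with hrestr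
      have hsplit : rest = same ++ restr := (List.takeWhile_append_dropWhile).symm
      have hsame_k : ∀ p ∈ same, p.1 = k := by
        intro p hp
        have := List.mem_takeWhile_imp hp
        simpa using this
      have hfstle : ∀ p ∈ rest, k ≤ p.1 := by
        intro p hp
        rcases hpw.1 p hp with h | ⟨h, _⟩
        · exact le_of_lt h
        · exact le_of_eq h
      have hrestr_gt : ∀ p ∈ restr, k < p.1 :=
        dropWhile_gt k rest (hpw.2.imp (fun {a b} h => by
          rcases h with h | ⟨h, _⟩
          · exact le_of_lt h
          · exact le_of_eq h)) hfstle
      -- the sorted key set splits off k, the least key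
      have hK : PySem.List.sorted (PySem.Set.ofList (((k, v) :: rest).map (fun p => p.1))) (fun x => x) false
          = k :: PySem.List.sorted (PySem.Set.ofList (restr.map (fun p => p.1))) (fun x => x) false := by
        set T := PySem.List.sorted (PySem.Set.ofList (restr.map (fun p => p.1))) (fun x => x) false with hT
        have hmemT : ∀ a, a ∈ T ↔ a ∈ restr.map (fun p => p.1) := by
          intro a
          rw [hT, PySem.List.mem_sorted, PySem.Set.mem_ofList]
        have hknotT : k ∉ T := by
          intro hk
          obtain ⟨p, hp, hpk⟩ := List.mem_map.mp ((hmemT k).mp hk)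
          exact absurd (hpk ▸ hrestr_gt p hp) (lt_irrefl k)
        apply PySem.List.sorted_eq_of_perm_of_pairwise_lt
        · refine (List.perm_ext_iff_of_nodup ?_ (PySem.Set.nodup_ofList _)).mpr ?_
          · exact List.nodup_cons.mpr ⟨hknotT,
              ((PySem.List.sorted_perm _ _ _).nodup_iff).mpr (PySem.Set.nodup_ofList _)⟩
          · intro a
            rw [List.mem_cons, hmemT, PySem.Set.mem_ofList, hsplit]
            simp only [List.map_cons, List.map_append, List.mem_cons, List.mem_append]
            constructor
            · rintro (rfl | h)
              · exact Or.inl rfl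
              · exact Or.inr (Or.inr h)
            · rintro (rfl | h | h)
              · exact Or.inl rfl
              · obtain ⟨p, hp, hpk⟩ := List.mem_map.mp h
                exact Or.inl (hpk.symm.trans (hsame_k p hp))
              · exact Or.inr h
        · refine List.pairwise_cons.mpr ⟨?_, hT ▸ PySem.List.sorted_ofList_pairwise_lt _⟩
          intro a ha
          obtain ⟨p, hp, hpk⟩ := List.mem_map.mp ((hmemT a).mp ha)
          exact hpk ▸ hrestr_gt p hp
      -- the values of key k are the head run, already value-sorted
      have hfk : ((k, v) :: rest).filter (fun p => p.1 == k) = (k, v) :: same := by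
        rw [hsplit, List.filter_cons]
        simp only [beq_self_eq_true, if_pos, List.filter_append]
        rw [List.filter_eq_self.mpr (fun p hp => by simp [hsame_k p hp]),
          List.filter_eq_nil_iff.mpr (fun p hp => by simp [ne_of_gt (hrestr_gt p hp)])]
        simp
      have hrun_pw : ((k, v) :: same).Pairwise lexLe := by
        refine hpwS.sublist ?_
        rw [hsplit]
        exact (List.sublist_append_left same restr).cons₂ (k, v)
      have hvk : PySem.List.sorted (((k, v) :: same).map (fun p => p.2)) (fun x => x) false
          = v :: same.map (fun q => q.2) := by
        apply PySem.List.sorted_eq_self_of_pairwise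
        rw [List.pairwise_map]
        refine (List.Pairwise.and_mem.mp hrun_pw).imp ?_
        rintro a b ⟨ha, hb, hab⟩
        have hka : a.1 = k := by
          rcases List.mem_cons.mp ha with rfl | ha
          · rfl
          · exact hsame_k a ha
        have hkb : b.1 = k := by
          rcases List.mem_cons.mp hb with rfl | hb
          · rfl
          · exact hsame_k b hb
        rcases hab with h | ⟨_, h⟩
        · rw [hka, hkb] at h
          exact absurd h (lt_irrefl k)
        · exact h
      -- recursion on the strictly-larger remainder
      have hpw2 : restr.Pairwise lexLe := hpw.2.sublist (hrestr ▸ List.dropWhile_sublist _)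
      have hlen2 : restr.length ≤ n := by
        have h1 : restr.length ≤ rest.length := hrestr ▸ List.length_dropWhile_le _ _
        have h2 : rest.length ≤ n := by simpa using Nat.lt_succ_iff.mp (Nat.lt_of_lt_of_le (by simp) hlen)
        omega
      have hfk' : ∀ a ∈ restr.map (fun p => p.1),
          ((k, v) :: rest).filter (fun p => p.1 == a) = restr.filter (fun p => p.1 == a) := by
        intro a ha
        obtain ⟨p, hp, hpk⟩ := List.mem_map.mp ha
        have hka : k ≠ a := ne_of_lt (hpk ▸ hrestr_gt p hp)
        rw [hsplit, List.filter_cons]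
        rw [if_neg (by simp [hka]), List.filter_append,
          List.filter_eq_nil_iff.mpr (fun q hq => by simp [hsame_k q hq, hka])]
        simp
      rw [srGroup, hK, List.map_cons, ← hsame, ← hrestr]
      congr 1
      · rw [hfk]
        simp only [List.map_cons] at hvk ⊢
        rw [hvk]
      · rw [ih restr hlen2 hpw2]
        refine (List.map_congr_left ?_).symm
        intro a ha
        rw [hfk' a (by
          rw [PySem.List.mem_sorted, PySem.Set.mem_ofList] at ha
          exact ha)]

-- ===== VERDICT (by name: the statement is the Claim_ definition above) =====
theorem shuffle_sort_spec : Claim_equal_shuffle_sort := by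
  intro l _
  unfold Spec_shuffle_sort shuffle_sort shuffle_sort_alt
  set s := PySem.List.sorted2 l (fun t => t.1) (fun t => t.2) with hs
  have hA : ((s.foldl srStep PySem.Dict.empty).items : List (String × List Int)) = srGroup s := by
    have := main_foldl s.length s PySem.Dict.empty le_rfl (sorted2_pairwise_fst l)
      (by simp [PySem.Dict.keys_empty])
      (by intro p _; simp [PySem.Dict.contains_eq_decide_mem_keys, PySem.Dict.keys_empty])
    simpa using this
  rw [hA, srGroup_eq s.length s le_rfl (sorted2_pairwise_lex l)]
  have hperm : s.Perm l := PySem.List.sorted2_perm l _ _ _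
  have hkeys : PySem.List.sorted (PySem.Set.ofList (s.map (fun p => p.1))) (fun k => k) false
      = PySem.List.sorted (PySem.Set.ofList (l.map (fun p => p.1))) (fun k => k) false := by
    apply PySem.List.sorted_eq_sorted_of_perm _ _ _ (fun a b h => h)
    refine (List.perm_ext_iff_of_nodup (PySem.Set.nodup_ofList _) (PySem.Set.nodup_ofList _)).mpr ?_
    intro a
    rw [PySem.Set.mem_ofList, PySem.Set.mem_ofList]
    exact (hperm.map (fun p => p.1)).mem_iff
  rw [hkeys]
  apply List.map_congr_left
  intro a _
  congr 1
  apply PySem.List.sorted_eq_sorted_of_perm _ _ _ (fun a b h => h)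
  exact (hperm.filter _).map _
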